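-- pv_equiv track=rewrite | github.com/kkr010128/codebert | problem234/problem234_59.py | foo
-- ===== SOURCE A (Python) =====
-- def foo(n,x,y):
--     l = len(n)
--     sm = 0
--     if x==y and (l>1 or n[0]>=x):
--         sm = 1
--     if l==1:
--         return sm
--     for i in range(2,l):
--         sm += 10**(i-2)
--     if x==n[-1]:
--         sm += bar(n[:-1],y)
--     elif x<n[-1]:
--         sm += 10**(l-2)
--     #ddprint(f"foo {n=} {x=} {y=} {sm=}")
--     return sm
--
-- def bar(n,y):
--     l = len(n)
--     if l==1:
--         return 1 if n[0]>=y else 0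
--     sm = (n[-1])*10**(l-2) + bar(n[:-1],y)
--     return sm
-- ===== SOURCE B (Python) =====
-- def foo(n, x, y):
--     l = len(n)
--     if l == 1:
--         return 1 if (x == y and n[0] >= x) else 0
--     sm = (1 if x == y else 0) + (10 ** (l - 2) - 1) // 9
--     if x == n[-1]:
--         # Horner build of bar(n[:-1], y) in one forward pass, no slicing recursion
--         b = 1 if n[0] >= y else 0
--         p = 1
--         for d in n[1:-1]:
--             b += d * p
--             p *= 10
--         sm += b
--     elif x < n[-1]:
--         sm += 10 ** (l - 2)
--     return sm
-- ===== Notes on version B (the rewrite author's own statement) =====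
-- stated objective: faster
-- what changed: Replaces A's per-call power loop (sum of 10**(i-2)) by the closed-form geometric sum (10**(l-2)-1)//9 and replaces bar's list-slicing recursion by a single forward Horner pass carrying (value, power-of-10).
import Mathlib
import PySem

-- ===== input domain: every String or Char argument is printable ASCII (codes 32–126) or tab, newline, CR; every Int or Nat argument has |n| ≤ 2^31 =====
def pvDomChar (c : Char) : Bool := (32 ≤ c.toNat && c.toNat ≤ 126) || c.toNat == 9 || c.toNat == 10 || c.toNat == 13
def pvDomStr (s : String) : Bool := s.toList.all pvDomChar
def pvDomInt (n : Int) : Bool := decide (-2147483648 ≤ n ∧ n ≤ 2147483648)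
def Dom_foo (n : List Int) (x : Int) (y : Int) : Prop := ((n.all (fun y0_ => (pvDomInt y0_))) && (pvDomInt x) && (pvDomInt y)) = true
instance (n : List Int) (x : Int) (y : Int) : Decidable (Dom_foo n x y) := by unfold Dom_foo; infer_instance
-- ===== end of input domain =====

-- B replaces A's O(l^2) per-step power loop and sliced recursion by a closed-form
-- geometric sum (10^(l-2)-1)//9 and a one-pass Horner fold (objective: faster, asymptotic).

-- ===== PORT A =====
-- helper 'bar' of A: recursion stripping the last element via n[:-1]
def bar (n : List Int) (y : Int) : Int :=
  let l : Int := n.length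
  if l ≤ 0 then 0  -- Python raises IndexError on []; guard only makes the recursion total (outside Pre_)
  else if l = 1 then (if PySem.List.pyGetD n 0 0 ≥ y then 1 else 0)
  else PySem.List.pyGetD n (-1) 0 * 10 ^ (l - 2).toNat + bar (PySem.List.slice n none (some (-1))) y
termination_by n.length
decreasing_by
  simp only [PySem.List.slice_to_neg_one, List.length_dropLast]
  omega

def foo (n : List Int) (x : Int) (y : Int) : Int :=
  let l : Int := n.length
  let sm : Int := if x = y ∧ (l > 1 ∨ PySem.List.pyGetD n 0 0 ≥ x) then 1 else 0
  if l = 1 then sm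
  else
    let sm := (PySem.List.pyRange 2 l 1).foldl (fun s i => s + 10 ^ (i - 2).toNat) sm
    if x = PySem.List.pyGetD n (-1) 0 then sm + bar (PySem.List.slice n none (some (-1))) y
    else if x < PySem.List.pyGetD n (-1) 0 then sm + 10 ^ (l - 2).toNat
    else sm

-- ===== PORT B =====
-- one forward Horner pass: carries (accumulated value, current power of 10)
def horner (t : List Int) (b : Int) (p : Int) : Int × Int :=
  t.foldl (fun bp d => (bp.1 + d * bp.2, bp.2 * 10)) (b, p)

def foo_alt (n : List Int) (x : Int) (y : Int) : Int :=
  let l : Int := n.length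
  if l = 1 then (if x = y ∧ PySem.List.pyGetD n 0 0 ≥ x then 1 else 0)
  else
    let sm : Int := (if x = y then 1 else 0) + PySem.Int.floordiv (10 ^ (l - 2).toNat - 1) 9
    if x = PySem.List.pyGetD n (-1) 0 then
      sm + (horner (PySem.List.slice n (some 1) (some (-1)))
              (if PySem.List.pyGetD n 0 0 ≥ y then 1 else 0) 1).1
    else if x < PySem.List.pyGetD n (-1) 0 then sm + 10 ^ (l - 2).toNat
    else sm

-- ===== PRECONDITION & SPEC =====
-- Pre_: Python A raises IndexError on the empty list (n[0] or n[-1]); nothing else is excluded.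
def Pre_foo (n : List Int) (x : Int) (y : Int) : Prop := n ≠ []
instance (n : List Int) (x : Int) (y : Int) : Decidable (Pre_foo n x y) := by unfold Pre_foo; infer_instance
def pvWitness_foo : List Int × Int × Int := ([3, 1, 4], 2, 5)

def Spec_foo (n : List Int) (x : Int) (y : Int) (out : Int) : Prop := out = foo_alt n x y
instance (n : List Int) (x : Int) (y : Int) (out : Int) : Decidable (Spec_foo n x y out) := by unfold Spec_foo; infer_instance

-- ===== CLAIM (what is proved, stated in full; the proofs are below) =====
def Claim_equal_foo : Prop := ∀ (n : List Int) (x : Int) (y : Int), Dom_foo n x y → Pre_foo n x y → Spec_foo n x y (foo n x y)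

-- ===== LEMMAS AND PROOFS =====

theorem nine_dvd_pow_sub_one (k : Nat) : (9 : Int) ∣ 10 ^ k - 1 := by
  induction k with
  | zero => simp
  | succ k ih =>
    have : (10 : Int) ^ (k + 1) - 1 = 10 * (10 ^ k - 1) + 9 := by ring
    rw [this]
    exact dvd_add (Dvd.dvd.mul_left ih 10) ⟨1, by ring⟩

theorem geo_foldl (s : Int) (k : Nat) :
    (PySem.List.pyRange 2 (2 + (k : Int)) 1).foldl (fun s i => s + 10 ^ (i - 2).toNat) s
      = s + (10 ^ k - 1) / 9 := by
  induction k generalizing s with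
  | zero => simp [PySem.List.pyRange_one_eq_nil]
  | succ k ih =>
    have h2 : (2 : Int) + ((k : Nat) + 1 : Nat) = (2 + (k : Int)) + 1 := by push_cast; ring
    rw [h2, PySem.List.pyRange_one_succ_right (by omega), List.foldl_append, ih]
    simp only [List.foldl_cons, List.foldl_nil]
    have ht : ((2 : Int) + (k : Int) - 2).toNat = k := by omega
    rw [ht]
    obtain ⟨a, ha⟩ := nine_dvd_pow_sub_one k
    obtain ⟨b, hb⟩ := nine_dvd_pow_sub_one (k + 1)
    have hpk : (10 : Int) ^ (k + 1) = 10 * 10 ^ k := by ring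
    rw [ha, hb, Int.mul_ediv_cancel_left a (by norm_num), Int.mul_ediv_cancel_left b (by norm_num)]
    have : (10 : Int) ^ k = 9 * a + 1 := by omega
    omega

theorem horner_snd (t : List Int) (b p : Int) : (horner t b p).2 = p * 10 ^ t.length := by
  induction t generalizing b p with
  | nil => simp [horner]
  | cons d t ih => simp [horner, List.foldl_cons] at *; rw [ih]; ring

theorem bar_eq_horner (a : Int) (t : List Int) (y : Int) :
    bar (a :: t) y = (horner t (if a ≥ y then 1 else 0) 1).1 := by
  induction t using List.reverseRecOn with
  | nil =>
    rw [bar]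
    simp [horner, PySem.List.pyGetD_zero_cons]
  | append_singleton t' d ih =>
    rw [bar]
    have hc : a :: (t' ++ [d]) = (a :: t') ++ [d] := by simp
    have hlen : ((a :: (t' ++ [d])).length : Int) = (t'.length : Int) + 2 := by
      simp; omega
    rw [hlen]
    have h1 : ¬ ((t'.length : Int) + 2 ≤ 0) := by omega
    have h2 : ¬ ((t'.length : Int) + 2 = 1) := by omega
    rw [if_neg h1, if_neg h2]
    rw [hc, PySem.List.pyGetD_neg_one_append_singleton, PySem.List.slice_to_neg_one]
    have hdl : (a :: (t' ++ [d])).dropLast = a :: t' := by rw [hc, List.dropLast_concat]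
    rw [hc] at hdl
    rw [hdl, ih]
    have ht : ((t'.length : Int) + 2 - 2).toNat = t'.length := by omega
    rw [ht]
    simp only [horner, List.foldl_append, List.foldl_cons, List.foldl_nil]
    have := horner_snd t' (if a ≥ y then 1 else 0) 1
    simp only [horner] at this
    rw [this]
    ring

-- ===== VERDICT (by name: the statement is the Claim_ definition above) =====
theorem foo_spec : Claim_equal_foo := by
  intro n x y _ hpre
  unfold Spec_foo
  match n with
  | [] => exact absurd rfl hpre
  | [a] =>
    simp [foo, foo_alt]
  | a :: b :: t =>
    have hlen : ((a :: b :: t).length : Int) = (t.length : Int) + 2 := by simp; omega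
    have h1 : ¬ ((t.length : Int) + 2 = 1) := by omega
    have hgt : ((t.length : Int) + 2) > 1 := by omega
    have hk : (2 : Int) + (t.length : Int) = (t.length : Int) + 2 := by ring
    have ht2 : ((t.length : Int) + 2 - 2).toNat = t.length := by omega
    -- n[:-1] and n[1:-1]
    have hdl : (a :: b :: t).dropLast = a :: (b :: t).dropLast := by
      simp [List.dropLast]
    have hsl1 : PySem.List.slice (a :: b :: t) (some 1) (some (-1)) = (b :: t).dropLast := by
      simp [PySem.List.slice, PySem.List.clampIdx]
      rw [if_neg (by omega)]
      simp [List.dropLast_eq_take]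
    have hsm : (if x = y ∧ ((t.length : Int) + 2 > 1 ∨ a ≥ x) then (1:Int) else 0)
        = (if x = y then 1 else 0) := by
      simp [hgt]
    unfold foo foo_alt
    simp only [hlen, if_neg h1, PySem.List.slice_to_neg_one, hdl, hsl1, ht2,
      PySem.List.pyGetD_zero_cons, bar_eq_horner, hsm,
      PySem.Int.floordiv_eq_ediv_of_pos (show (0:Int) < 9 by norm_num)]
    have hgeo := geo_foldl (if x = y then (1:Int) else 0) t.length
    rw [hk] at hgeo
    rw [hgeo]
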